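-- pv_equiv track=rewrite | github.com/sam-khare/Ethereum_Analysis | scam2.py | trnx_scam_reducer
-- ===== SOURCE A (Python) =====
-- def trnx_scam_reducer(key, values):
-- 	total_value=0
-- 	category=None
-- 	status = None
--
-- 	for val in values:
-- 		if val[0] == 1:
-- 			total_value +=  val[0]
-- 		else:
-- 			category = val[1]
-- 			status = val[2]
-- 	if category is not None and status is not None:
-- 		yield (status,category), total_value
-- ===== SOURCE B (Python) =====
-- def trnx_scam_reducer(key, values):
--     # Each qualifying entry contributes exactly 1, so the total is the COUNT of ones;
--     # category/status come from the first non-one entry found scanning in REVERSE.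
--     vals = list(values)
--     hit = next((v for v in reversed(vals) if v[0] != 1), None)
--     if hit is not None:
--         yield (hit[2], hit[1]), [v[0] for v in vals].count(1)
-- ===== Notes on version B (the rewrite author's own statement) =====
-- stated objective: alternative
-- what changed: Drops A's running accumulator entirely: the total is computed as the COUNT of first-components equal to 1 (each contributes exactly 1, so no summation), and category/status are found by a short-circuiting reverse scan (next over reversed) instead of overwriting state across the whole list.
import Mathlib
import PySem

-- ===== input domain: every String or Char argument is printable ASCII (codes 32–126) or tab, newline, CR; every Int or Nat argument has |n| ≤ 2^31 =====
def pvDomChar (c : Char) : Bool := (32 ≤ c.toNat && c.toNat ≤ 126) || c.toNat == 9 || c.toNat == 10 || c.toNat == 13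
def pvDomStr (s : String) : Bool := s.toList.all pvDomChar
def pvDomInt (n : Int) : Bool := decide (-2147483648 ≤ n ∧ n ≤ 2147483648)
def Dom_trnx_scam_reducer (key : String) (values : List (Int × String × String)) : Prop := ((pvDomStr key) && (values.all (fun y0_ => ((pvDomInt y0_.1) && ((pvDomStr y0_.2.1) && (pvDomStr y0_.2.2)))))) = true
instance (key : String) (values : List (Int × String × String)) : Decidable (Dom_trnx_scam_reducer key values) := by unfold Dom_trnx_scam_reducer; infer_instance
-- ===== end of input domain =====

-- B drops A's running accumulator: the total is the COUNT of first-components equal to 1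
-- (each qualifying entry adds exactly 1), and category/status come from a reverse-order
-- search for the first non-one entry; objective: alternative decomposition, same cost.

-- ===== PORT A =====
-- A's loop, step for step: state = (total_value, category, status); generator output collected in order.
def trnx_scam_reducer (key : String) (values : List (Int × String × String)) : List ((String × String) × Int) :=
  let st := values.foldl
    (fun (acc : Int × Option String × Option String) val =>
      if val.1 == 1 then (acc.1 + val.1, acc.2.1, acc.2.2)
      else (acc.1, some val.2.1, some val.2.2))
    (0, none, none)
  match st with
  | (total_value, some category, some status) => [((status, category), total_value)]
  | _ => []

-- ===== PORT B =====
-- Source B: next over reversed(vals) → List.find? on the reversed list; list(...).count(1) → List.count.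
def trnx_scam_reducer_alt (key : String) (values : List (Int × String × String)) : List ((String × String) × Int) :=
  match values.reverse.find? (fun v => v.1 != 1) with
  | some hit => [((hit.2.2, hit.2.1), ((values.map (fun v => v.1)).count 1 : Int))]
  | none => []

-- ===== PRECONDITION & SPEC =====
def Spec_trnx_scam_reducer (key : String) (values : List (Int × String × String)) (out : List ((String × String) × Int)) : Prop := out = trnx_scam_reducer_alt key values
instance (key : String) (values : List (Int × String × String)) (out : List ((String × String) × Int)) : Decidable (Spec_trnx_scam_reducer key values out) := by unfold Spec_trnx_scam_reducer; infer_instance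

-- ===== CLAIM =====
def Claim_equal_trnx_scam_reducer : Prop := ∀ (key : String) (values : List (Int × String × String)), Dom_trnx_scam_reducer key values → Spec_trnx_scam_reducer key values (trnx_scam_reducer key values)

-- ===== LEMMAS AND PROOFS =====

-- A's fold, characterised: total is the count of 1-entries; category/status follow the
-- first non-1 entry of the reversed list (= the last non-1 entry).
theorem trnx_foldl_char (l : List (Int × String × String)) (t : Int) (c s : Option String) :
    l.foldl
      (fun (acc : Int × Option String × Option String) val =>
        if val.1 == 1 then (acc.1 + val.1, acc.2.1, acc.2.2)
        else (acc.1, some val.2.1, some val.2.2))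
      (t, c, s)
    = (t + ((l.map (fun v => v.1)).count 1 : Int),
       match l.reverse.find? (fun v => v.1 != 1) with
       | some v => (some v.2.1, some v.2.2)
       | none => (c, s)) := by
  induction l generalizing t c s with
  | nil => simp
  | cons x xs ih =>
    have hrev : (x :: xs).reverse.find? (fun v => v.1 != 1)
        = (xs.reverse.find? (fun v => v.1 != 1)).or
            (if x.1 = 1 then none else some x) := by
      simp only [List.reverse_cons, List.find?_append]
      congr 1
      by_cases hx : x.1 = 1
      · simp [List.find?, bne, hx]
      · have hb : (x.1 == 1) = false := beq_eq_false_iff_ne.mpr hx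
        simp [List.find?, bne, hb, hx]
    by_cases hx : x.1 = 1
    · rw [List.foldl_cons, if_pos (by simp [hx]), ih, hrev, if_pos hx, Option.or_none]
      rcases h : xs.reverse.find? (fun v => v.1 != 1) with _ | v <;>
        simp [h, hx] <;> omega
    · rw [List.foldl_cons, if_neg (by simp [hx]), ih, hrev, if_neg hx]
      rcases h : xs.reverse.find? (fun v => v.1 != 1) with _ | v <;>
        simp [h, hx, Option.or]

-- ===== VERDICT =====
theorem trnx_scam_reducer_spec : Claim_equal_trnx_scam_reducer := by
  intro key values _
  unfold Spec_trnx_scam_reducer trnx_scam_reducer trnx_scam_reducer_alt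
  simp only [trnx_foldl_char, zero_add]
  rcases h : values.reverse.find? (fun v => v.1 != 1) with _ | v <;> simp [h]
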